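-- pv_equiv track=rewrite | github.com/Sumedha494/DSA-Questions | maximum_product_count.py | maxProductCount
-- ===== SOURCE A (Python) =====
-- def maxProductCount(arr):
--     """
--     Find count of maximum product subarray
--
--     First find max product, then count subarrays with that product
--     Time: O(n²), Space: O(1)
--     """
--     if not arr:
--         return 0
--
--     n = len(arr)
--     max_product = arr[0]
--     count = 0
--
--     # Find maximum product
--     for i in range(n):
--         product = 1
--         for j in range(i, n):
--             product *= arr[j]
--             if product > max_product:
--                 max_product = product
--
--     # Count subarrays with max product
--     for i in range(n):
--         product = 1
--         for j in range(i, n):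
--             product *= arr[j]
--             if product == max_product:
--                 count += 1
--
--     return count
-- ===== SOURCE B (Python) =====
-- def maxProductCount(arr):
--     """Single left-to-right pass: maintain the list of products of all
--     subarrays ending at the current index, and update the running maximum
--     together with its occurrence count on the fly."""
--     if not arr:
--         return 0
--     best = arr[0]
--     cnt = 0
--     ext = []  # products of subarrays ending at the previous index
--     for x in arr:
--         ext = [p * x for p in ext] + [x]
--         for p in ext:
--             if p > best:
--                 best, cnt = p, 1
--             elif p == best:
--                 cnt += 1
--     return cnt
-- ===== Notes on version B (the rewrite author's own statement) =====
-- stated objective: alternative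
-- what changed: A makes two separate nested index passes (one to find the maximum subarray product, one to count it); B makes a single left-to-right pass that extends the list of products of subarrays ending at the current index and maintains the running maximum and its count simultaneously.
import Mathlib
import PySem

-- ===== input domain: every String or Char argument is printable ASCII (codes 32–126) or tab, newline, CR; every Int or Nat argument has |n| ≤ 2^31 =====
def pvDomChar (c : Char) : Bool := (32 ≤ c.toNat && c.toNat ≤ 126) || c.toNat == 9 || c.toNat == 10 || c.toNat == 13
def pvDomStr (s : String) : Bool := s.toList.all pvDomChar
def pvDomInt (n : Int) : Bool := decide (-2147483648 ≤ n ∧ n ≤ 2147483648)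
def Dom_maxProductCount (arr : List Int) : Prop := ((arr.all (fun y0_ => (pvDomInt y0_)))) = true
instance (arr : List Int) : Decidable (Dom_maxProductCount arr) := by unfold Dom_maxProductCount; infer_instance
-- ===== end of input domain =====

-- B replaces A's two separate nested index passes by a single left-to-right pass that
-- maintains the products of all subarrays ending at the current index together with the
-- running maximum product and its occurrence count (objective: alternative one-pass algorithm).

-- ===== PORT A =====
-- inner-loop step of A's first nested pass: p *= arr[j]; if p > max: max = p
def pvAMaxStep (arr : List Int) (s : Int × Int) (j : Int) : Int × Int :=
  (s.1 * PySem.List.pyGetD arr j 0,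
   if s.1 * PySem.List.pyGetD arr j 0 > s.2 then s.1 * PySem.List.pyGetD arr j 0 else s.2)

-- inner-loop step of A's second nested pass: p *= arr[j]; if p == maxp: count += 1
def pvACntStep (arr : List Int) (maxp : Int) (s : Int × Int) (j : Int) : Int × Int :=
  (s.1 * PySem.List.pyGetD arr j 0,
   if s.1 * PySem.List.pyGetD arr j 0 = maxp then s.2 + 1 else s.2)

def maxProductCount (arr : List Int) : Int :=
  if arr = [] then 0
  else
    let n := PySem.List.len arr
    let maxp := (PySem.List.pyRange 0 n 1).foldl
      (fun m i => ((PySem.List.pyRange i n 1).foldl (pvAMaxStep arr) (1, m)).2)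
      (PySem.List.pyGetD arr 0 0)
    (PySem.List.pyRange 0 n 1).foldl
      (fun c i => ((PySem.List.pyRange i n 1).foldl (pvACntStep arr maxp) (1, c)).2) 0

-- ===== PORT B =====
-- B's inner loop: update (best, count) with one product p
def pvStreamStep (bc : Int × Int) (p : Int) : Int × Int :=
  if p > bc.1 then (p, 1) else if p = bc.1 then (bc.1, bc.2 + 1) else bc

-- B's outer loop body: extend the ending-here product list by x, then scan it
def pvBigStep (s : List Int × Int × Int) (x : Int) : List Int × Int × Int :=
  ((s.1.map (· * x)) ++ [x], ((s.1.map (· * x)) ++ [x]).foldl pvStreamStep s.2)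

def maxProductCount_alt (arr : List Int) : Int :=
  match arr with
  | [] => 0
  | a :: _ => (arr.foldl pvBigStep ([], a, 0)).2.2

-- ===== PRECONDITION & SPEC =====
def Spec_maxProductCount (arr : List Int) (out : Int) : Prop := out = maxProductCount_alt arr
instance (arr : List Int) (out : Int) : Decidable (Spec_maxProductCount arr out) := by unfold Spec_maxProductCount; infer_instance

-- ===== CLAIM (what is proved, stated in full; the proofs are below) =====
def Claim_equal_maxProductCount : Prop := ∀ (arr : List Int), Dom_maxProductCount arr → Spec_maxProductCount arr (maxProductCount arr)

-- ===== LEMMAS AND PROOFS =====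

-- products of the nonempty prefixes of xs, each multiplied by the running factor q
def pvProds (q : Int) : List Int → List Int
  | [] => []
  | x :: t => (q * x) :: pvProds (q * x) t

-- all subarray products, grouped by start index (A's enumeration order)
def pvRow (arr : List Int) : List Int :=
  (List.range arr.length).flatMap (fun i => pvProds 1 (arr.drop i))

-- all subarray products, grouped by end index (B's enumeration order), from ext list e
def pvCols (e : List Int) : List Int → List Int
  | [] => []
  | x :: t => (e.map (· * x) ++ [x]) ++ pvCols (e.map (· * x) ++ [x]) t

-- the ext list after processing xs starting from e
def pvExt (e : List Int) (xs : List Int) : List Int :=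
  xs.foldl (fun e x => e.map (· * x) ++ [x]) e

theorem pvProds_append (t : List Int) : ∀ (q x : Int),
    pvProds q (t ++ [x]) = pvProds q t ++ [q * t.prod * x] := by
  induction t with
  | nil => intro q x; simp [pvProds]
  | cons a t ih => intro q x; simp [pvProds, ih, mul_assoc]

theorem pvA_inner_max (xs : List Int) : ∀ (q m : Int),
    (xs.foldl (fun (s : Int × Int) v =>
      (s.1 * v, if s.1 * v > s.2 then s.1 * v else s.2)) (q, m)).2
    = (pvProds q xs).foldl max m := by
  induction xs with
  | nil => intro q m; simp [pvProds]
  | cons x t ih =>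
    intro q m
    simp only [List.foldl_cons, pvProds, ih]
    congr 1
    rw [max_def]
    split_ifs <;> omega

theorem pvA_inner_cnt (xs : List Int) : ∀ (q c M : Int),
    (xs.foldl (fun (s : Int × Int) v =>
      (s.1 * v, if s.1 * v = M then s.2 + 1 else s.2)) (q, c)).2
    = c + ((pvProds q xs).count M : Int) := by
  induction xs with
  | nil => intro q c M; simp [pvProds]
  | cons x t ih =>
    intro q c M
    simp only [List.foldl_cons, pvProds, ih, List.count_cons]
    by_cases h : q * x = M <;> simp [h] <;> omega

theorem pvFoldl_flatMap {γ α β : Type} (l : List γ) (f : γ → List α) (g : β → α → β) :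
    ∀ b, (l.flatMap f).foldl g b = l.foldl (fun b i => (f i).foldl g b) b := by
  induction l with
  | nil => intro b; rfl
  | cons a l ih => intro b; simp [List.flatMap_cons, List.foldl_append, ih]

theorem pvFoldl_add_count {γ : Type} (l : List γ) (f : γ → List Int) (M : Int) :
    ∀ (c : Int), l.foldl (fun c i => c + (((f i).count M : Int))) c
      = c + ((l.flatMap f).count M : Int) := by
  induction l with
  | nil => intro c; simp
  | cons a l ih => intro c; simp [List.flatMap_cons, List.count_append, ih]; push_cast; ring

theorem pvStream_eq (l : List Int) : ∀ (b c : Int),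
    l.foldl pvStreamStep (b, c)
      = (l.foldl max b,
         if b < l.foldl max b then ((l.count (l.foldl max b) : Int))
         else c + (l.count b : Int)) := by
  induction l with
  | nil => intro b c; simp
  | cons x t ih =>
    intro b c
    simp only [List.foldl_cons]
    by_cases h1 : x > b
    · have hmax : max b x = x := max_eq_right h1.le
      have hx : x ≤ t.foldl max x := (PySem.List.le_foldl_max t x).1
      rw [show pvStreamStep (b, c) x = (x, 1) by simp [pvStreamStep, h1]]
      rw [ih, hmax]
      rcases eq_or_lt_of_le hx with he | hlt
      · simp [← he, List.count_cons, h1]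
        omega
      · have hne : ¬ (x = t.foldl max x) := by omega
        simp [hlt, h1.trans_le hx, List.count_cons, hne]
    · have hmax : max b x = b := max_eq_left (by omega)
      have hb : b ≤ t.foldl max b := (PySem.List.le_foldl_max t b).1
      by_cases h2 : x = b
      · rw [show pvStreamStep (b, c) x = (b, c + 1) by simp [pvStreamStep, h1, h2]]
        rw [ih, hmax]
        rcases eq_or_lt_of_le hb with he | hlt
        · simp [← he, List.count_cons, h2]
          omega
        · have hne : ¬ (x = t.foldl max b) := by omega
          simp [hlt, List.count_cons, hne, h2]
          omega
      · rw [show pvStreamStep (b, c) x = (b, c) by simp [pvStreamStep, h1, h2]]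
        rw [ih, hmax]
        rcases eq_or_lt_of_le hb with he | hlt
        · simp [← he, List.count_cons, h2]
        · have hne : ¬ (x = t.foldl max b) := by omega
          simp [hlt, List.count_cons, hne]

theorem pvB_fold (xs : List Int) : ∀ (e : List Int) (bc : Int × Int),
    (xs.foldl pvBigStep (e, bc)).2 = (pvCols e xs).foldl pvStreamStep bc := by
  induction xs with
  | nil => intro e bc; rfl
  | cons x t ih =>
    intro e bc
    have h : (List.foldl pvBigStep (pvBigStep (e, bc) x) t).2
        = (pvCols (e.map (· * x) ++ [x]) t).foldl pvStreamStep
            ((e.map (· * x) ++ [x]).foldl pvStreamStep bc) := ih _ _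
    simp only [List.foldl_cons, pvCols, List.foldl_append]
    simpa [List.foldl_append] using h

theorem pvExt_append (xs : List Int) (e : List Int) (x : Int) :
    pvExt e (xs ++ [x]) = (pvExt e xs).map (· * x) ++ [x] := by
  simp [pvExt, List.foldl_append]

theorem pvCols_append (xs : List Int) : ∀ (e : List Int) (x : Int),
    pvCols e (xs ++ [x]) = pvCols e xs ++ ((pvExt e xs).map (· * x) ++ [x]) := by
  induction xs with
  | nil => intro e x; simp [pvCols, pvExt]
  | cons y t ih =>
    intro e x
    simp only [List.cons_append, pvCols, ih, pvExt, List.foldl_cons, List.append_assoc]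

theorem pvExt_char (ys : List Int) :
    pvExt [] ys = (List.range ys.length).map (fun i => (ys.drop i).prod) := by
  induction ys using List.reverseRecOn with
  | nil => simp [pvExt]
  | append_singleton ys x ih =>
    rw [pvExt_append, ih, List.length_append, List.length_singleton, List.range_succ]
    simp only [List.map_append, List.map_map, List.map_cons, List.map_nil]
    congr 1
    · apply List.map_congr_left
      intro i hi
      have hi' : i ≤ ys.length := (List.mem_range.mp hi).le
      simp [List.drop_append_of_le_length hi']
    · simp
theorem pvPerm_flatMap_append_map {γ α : Type} (l : List γ) (f : γ → List α) (g : γ → α) :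
    (l.flatMap (fun i => f i ++ [g i])).Perm (l.flatMap f ++ l.map g) := by
  induction l with
  | nil => simp
  | cons a l ih =>
    simp only [List.flatMap_cons, List.map_cons, List.append_assoc]
    refine ((ih.append_left _).append_left _).trans ?_
    refine (List.Perm.append_left (f a) ?_)
    simpa using (List.perm_middle (a := g a) (l₁ := l.flatMap f) (l₂ := l.map g)).symm

theorem pvPerm_row_col (arr : List Int) : (pvRow arr).Perm (pvCols [] arr) := by
  induction arr using List.reverseRecOn with
  | nil => simp [pvRow, pvCols]
  | append_singleton ys x ih =>
    rw [pvCols_append, pvExt_char]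
    have hrow : pvRow (ys ++ [x])
        = (List.range ys.length).flatMap
            (fun i => pvProds 1 (ys.drop i) ++ [1 * (ys.drop i).prod * x]) ++ [x] := by
      unfold pvRow
      rw [List.length_append, List.length_singleton, List.range_succ, List.flatMap_append]
      congr 1
      · rw [List.flatMap_def, List.flatMap_def]
        congr 1
        apply List.map_congr_left
        intro i hi
        have hi' : i ≤ ys.length := (List.mem_range.mp hi).le
        rw [List.drop_append_of_le_length hi', pvProds_append]
      · simp [pvProds]
    rw [hrow]
    refine ((pvPerm_flatMap_append_map _ _ _).append_right [x]).trans ?_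
    refine ((ih.append_right _).append_right [x]).trans ?_
    have heq : (pvCols [] ys ++ (List.range ys.length).map (fun i => 1 * (ys.drop i).prod * x)) ++ [x]
        = pvCols [] ys ++ (((List.range ys.length).map (fun i => (ys.drop i).prod)).map (· * x) ++ [x]) := by
      simp [List.map_map, Function.comp_def, one_mul, List.append_assoc]
    exact heq ▸ List.Perm.refl _
theorem pvPerm_foldl_max {l₁ l₂ : List Int} (h : l₁.Perm l₂) :
    ∀ b, l₁.foldl max b = l₂.foldl max b := by
  induction h with
  | nil => intro b; rfl
  | cons x _ ih => intro b; simp [ih]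
  | swap x y l => intro b; simp [max_right_comm]
  | trans _ _ ih1 ih2 => intro b; rw [ih1, ih2]

theorem pvA_outer_max (arr : List Int) (m0 : Int) :
    (PySem.List.pyRange 0 (PySem.List.len arr) 1).foldl
        (fun m i => ((PySem.List.pyRange i (PySem.List.len arr) 1).foldl (pvAMaxStep arr) (1, m)).2) m0
      = (pvRow arr).foldl max m0 := by
  have hbody : ∀ (m : Int) (k : ℕ),
      ((PySem.List.pyRange (k : Int) (PySem.List.len arr) 1).foldl (pvAMaxStep arr) (1, m)).2
        = (pvProds 1 (arr.drop k)).foldl max m := by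
    intro m k
    have h := PySem.List.foldl_pyRange_pyGetD (xs := arr) (a := (k : Int)) (d := 0)
      (f := fun (s : Int × Int) v => (s.1 * v, if s.1 * v > s.2 then s.1 * v else s.2))
      (init := ((1 : Int), m)) (by positivity)
    rw [Int.toNat_natCast] at h
    calc ((PySem.List.pyRange (k : Int) (PySem.List.len arr) 1).foldl (pvAMaxStep arr) (1, m)).2
        = ((arr.drop k).foldl (fun (s : Int × Int) v =>
            (s.1 * v, if s.1 * v > s.2 then s.1 * v else s.2)) (1, m)).2 := congrArg Prod.snd h
      _ = _ := pvA_inner_max _ _ _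
  rw [PySem.List.pyRange_one]
  simp only [sub_zero, PySem.List.len_eq, Int.toNat_natCast, List.foldl_map, zero_add]
  rw [pvRow, pvFoldl_flatMap]
  exact PySem.List.foldl_congr_mem _ _ _ _ (fun b k _ => hbody b k)

theorem pvA_outer_cnt (arr : List Int) (M : Int) :
    (PySem.List.pyRange 0 (PySem.List.len arr) 1).foldl
        (fun c i => ((PySem.List.pyRange i (PySem.List.len arr) 1).foldl (pvACntStep arr M) (1, c)).2) 0
      = ((pvRow arr).count M : Int) := by
  have hbody : ∀ (c : Int) (k : ℕ),
      ((PySem.List.pyRange (k : Int) (PySem.List.len arr) 1).foldl (pvACntStep arr M) (1, c)).2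
        = c + ((pvProds 1 (arr.drop k)).count M : Int) := by
    intro c k
    have h := PySem.List.foldl_pyRange_pyGetD (xs := arr) (a := (k : Int)) (d := 0)
      (f := fun (s : Int × Int) v => (s.1 * v, if s.1 * v = M then s.2 + 1 else s.2))
      (init := ((1 : Int), c)) (by positivity)
    rw [Int.toNat_natCast] at h
    calc ((PySem.List.pyRange (k : Int) (PySem.List.len arr) 1).foldl (pvACntStep arr M) (1, c)).2
        = ((arr.drop k).foldl (fun (s : Int × Int) v =>
            (s.1 * v, if s.1 * v = M then s.2 + 1 else s.2)) (1, c)).2 := congrArg Prod.snd h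
      _ = _ := pvA_inner_cnt _ _ _ _
  rw [PySem.List.pyRange_one]
  simp only [sub_zero, PySem.List.len_eq, Int.toNat_natCast, List.foldl_map, zero_add]
  rw [pvRow]
  have := pvFoldl_add_count (List.range arr.length) (fun i => pvProds 1 (arr.drop i)) M 0
  rw [zero_add] at this
  rw [← this]
  exact PySem.List.foldl_congr_mem _ _ _ _ (fun b k _ => hbody b k)

theorem pvMain (a : Int) (t : List Int) :
    maxProductCount (a :: t) = maxProductCount_alt (a :: t) := by
  have hB : maxProductCount_alt (a :: t)
      = (((pvCols [] (a :: t)).count ((pvCols [] (a :: t)).foldl max a)) : Int) := by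
    show (((a :: t).foldl pvBigStep ([], a, 0)).2).2 = _
    rw [pvB_fold, pvStream_eq]
    have ha : a ≤ (pvCols [] (a :: t)).foldl max a :=
      (PySem.List.le_foldl_max (pvCols [] (a :: t)) a).1
    rcases eq_or_lt_of_le ha with he | hlt
    · simp [← he]
    · simp [hlt]
  have hA : maxProductCount (a :: t)
      = (((pvRow (a :: t)).count ((pvRow (a :: t)).foldl max a)) : Int) := by
    rw [show maxProductCount (a :: t) = (if (a :: t) = ([] : List Int) then (0 : Int) else
      (PySem.List.pyRange 0 (PySem.List.len (a :: t)) 1).foldl (fun c i =>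
        ((PySem.List.pyRange i (PySem.List.len (a :: t)) 1).foldl
          (pvACntStep (a :: t) ((PySem.List.pyRange 0 (PySem.List.len (a :: t)) 1).foldl
            (fun m i => ((PySem.List.pyRange i (PySem.List.len (a :: t)) 1).foldl
              (pvAMaxStep (a :: t)) (1, m)).2)
            (PySem.List.pyGetD (a :: t) 0 0))) (1, c)).2) 0) from rfl]
    rw [if_neg (by simp), PySem.List.pyGetD_zero_cons, pvA_outer_max, pvA_outer_cnt]
  rw [hA, hB]
  have hperm := pvPerm_row_col (a :: t)
  rw [pvPerm_foldl_max hperm a, hperm.count_eq]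

-- ===== VERDICT (by name: the statement is the Claim_ definition above) =====
theorem maxProductCount_spec : Claim_equal_maxProductCount := by
  unfold Claim_equal_maxProductCount
  intro arr _
  unfold Spec_maxProductCount
  cases arr with
  | nil => rfl
  | cons a t => exact pvMain a t
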